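-- pv_equiv track=rewrite | github.com/IIIBreakeRIII/Programmers | Level 0/make1.py | solution
-- ===== SOURCE A (Python) =====
-- def solution(num_list):
--
--     count = 0
--
--     for num in num_list:
--         while num != 1:
--             if num % 2 == 0:
--                 num = num //2
--                 count += 1
--             else:
--                 num = (num - 1) // 2
--                 count += 1
--
--     return count
-- ===== SOURCE B (Python) =====
-- def solution(num_list):
--     return sum(num.bit_length() - 1 for num in num_list)
-- ===== Notes on version B (the rewrite author's own statement) =====
-- stated objective: alternative
-- what changed: Replaces the per-element halving while-loop with the closed form bit_length(num)-1 summed in one pass (intended as O(n) vs O(n log max); a timing run could not measure a ratio because A does not finish on the random timing inputs).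
import Mathlib
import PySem

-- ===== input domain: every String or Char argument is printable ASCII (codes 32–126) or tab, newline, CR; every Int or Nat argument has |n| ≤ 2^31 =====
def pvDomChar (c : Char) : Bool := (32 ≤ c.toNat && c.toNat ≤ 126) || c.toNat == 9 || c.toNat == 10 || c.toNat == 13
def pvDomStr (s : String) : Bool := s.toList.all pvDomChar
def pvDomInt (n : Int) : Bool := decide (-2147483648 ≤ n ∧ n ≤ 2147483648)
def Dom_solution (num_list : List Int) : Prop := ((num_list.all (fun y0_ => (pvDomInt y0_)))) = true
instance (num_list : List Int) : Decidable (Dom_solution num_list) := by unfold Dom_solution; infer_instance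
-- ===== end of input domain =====

-- B replaces the per-element halving while-loop with the closed form bit_length(num)-1, summed in one pass.

-- ===== PORT A =====
-- the while-loop of A; fuel only makes the recursion structural — for 1 ≤ num,
-- fuel = num.toNat always suffices, so behaviour on Pre_ matches Python exactly
def solutionLoopA : Nat → Int → Int → Int
  | 0, _, count => count
  | fuel + 1, num, count =>
    if num = 1 then count
    else if PySem.Int.mod num 2 = 0 then
      solutionLoopA fuel (PySem.Int.floordiv num 2) (count + 1)
    else
      solutionLoopA fuel (PySem.Int.floordiv (num - 1) 2) (count + 1)

def solution (num_list : List Int) : Int :=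
  num_list.foldl (fun count num => solutionLoopA num.toNat num count) 0

-- ===== PORT B =====
def solution_alt (num_list : List Int) : Int :=
  num_list.foldl (fun acc num => acc + ((PySem.Int.bitLength num : Int) - 1)) 0

-- ===== PRECONDITION & SPEC =====
-- A's while-loop never terminates for num ≤ 0 (Python diverges), so Pre_ requires every element ≥ 1
def Pre_solution (num_list : List Int) : Prop := ∀ n ∈ num_list, 1 ≤ n
instance (num_list : List Int) : Decidable (Pre_solution num_list) := by unfold Pre_solution; infer_instance
def pvWitness_solution : List Int := [1, 2, 7, 1024]

def Spec_solution (num_list : List Int) (out : Int) : Prop := out = solution_alt num_list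
instance (num_list : List Int) (out : Int) : Decidable (Spec_solution num_list out) := by unfold Spec_solution; infer_instance

-- ===== CLAIM (what is proved, stated in full; the proofs are below) =====
def Claim_equal_solution : Prop := ∀ (num_list : List Int), Dom_solution num_list → Pre_solution num_list → Spec_solution num_list (solution num_list)

-- ===== LEMMAS AND PROOFS =====

lemma solutionLoopA_eq (fuel : Nat) : ∀ (n count : Int), 1 ≤ n → n.toNat ≤ fuel →
    solutionLoopA fuel n count = count + ((PySem.Int.bitLength n : Int) - 1) := by
  induction fuel with
  | zero => intro n count h1 hf; omega
  | succ fuel ih =>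
    intro n count h1 hf
    by_cases hone : n = 1
    · subst hone; simp [solutionLoopA]; decide
    · have h2 : 2 ≤ n := by omega
      have hbl := PySem.Int.bitLength_of_pos (n := n) (by omega)
      have hdiv : PySem.Int.floordiv n 2 = n / 2 :=
        PySem.Int.floordiv_eq_ediv_of_pos (by omega)
      have hrec : 1 ≤ n / 2 ∧ (n / 2).toNat ≤ fuel := by omega
      rw [solutionLoopA]
      by_cases hm : PySem.Int.mod n 2 = 0
      · simp only [hone, hm, if_false, if_true]
        rw [hdiv, ih (n / 2) (count + 1) hrec.1 hrec.2, hbl, hdiv]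
        push_cast; ring
      · have hdiv' : PySem.Int.floordiv (n - 1) 2 = n / 2 := by
          have := PySem.Int.floordiv_eq_ediv_of_pos (a := n - 1) (b := 2) (by omega)
          rw [this]
          have hm2 := PySem.Int.mod_eq_emod_of_pos (a := n) (b := 2) (by omega)
          have : n % 2 = 1 := by
            have h0 : 0 ≤ n % 2 := Int.emod_nonneg n (by omega)
            have hlt : n % 2 < 2 := Int.emod_lt_of_pos n (by omega)
            rcases Int.emod_two_eq_zero_or_one n with h | h
            · exact absurd (hm2.trans h) hm
            · exact h
          omega
        simp only [if_neg hone, if_neg hm]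
        rw [hdiv', ih (n / 2) (count + 1) hrec.1 hrec.2, hbl, hdiv]
        push_cast; ring

lemma solution_foldl_eq : ∀ (l : List Int) (acc : Int), (∀ n ∈ l, 1 ≤ n) →
    l.foldl (fun count num => solutionLoopA num.toNat num count) acc
      = l.foldl (fun acc num => acc + ((PySem.Int.bitLength num : Int) - 1)) acc := by
  intro l
  induction l with
  | nil => intro acc _; rfl
  | cons x xs ih =>
    intro acc hpre
    simp only [List.foldl_cons]
    rw [solutionLoopA_eq x.toNat x acc (hpre x (by simp)) (le_refl _)]
    exact ih _ (fun n hn => hpre n (by simp [hn]))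

-- ===== VERDICT (by name: the statement is the Claim_ definition above) =====
theorem solution_spec : Claim_equal_solution := by
  intro num_list _ hpre
  unfold Spec_solution solution solution_alt
  exact solution_foldl_eq num_list 0 hpre
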